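-- pv_equiv track=rewrite | github.com/Aneureka/Life_in_NJU | LexicalAnalyser/automaton/util.py | replace_square_bracket
-- ===== SOURCE A (Python) =====
-- def replace_square_bracket(re):
--     to_dispose = re[1:len(re)-1]
--     l = len(to_dispose)
--     ctn = []
--     index = 0
--     while index < l:
--         item = to_dispose[index]
--         if item == "\\" and index+1 < l:
--             item += to_dispose[index+1]
--             index += 1
--         elif index+2 < l and to_dispose[index+1] == "-":
--             item += to_dispose[index+1] + to_dispose[index+2]
--             index += 2
--         index += 1
--         ctn.append(item)
--     chars = []
--     for item in ctn:
--         if "-" in item and "\\" not in item: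
--             for i in range(ord(item[0]), ord(item[-1])+1):
--                 chars.append(chr(i))
--         else:
--             chars.append(item)
--     res = "|".join(chars)
--     return "(" + res + ")"
-- ===== SOURCE B (Python) =====
-- def replace_square_bracket(re):
--     body = re[1:len(re)-1]
--     l = len(body)
--     parts = []
--     i = 0
--     # one pass: tokenize and expand at the same time, no intermediate token list
--     while i < l:
--         if body[i] == "\\" and i + 1 < l:
--             parts.append(body[i:i+2])
--             i += 2
--         elif i + 2 < l and body[i+1] == "-":
--             if body[i+2] == "\\":
--                 parts.append(body[i:i+3])
--             else:
--                 parts.extend(chr(k) for k in range(ord(body[i]), ord(body[i+2]) + 1))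
--             i += 3
--         else:
--             parts.append(body[i])
--             i += 1
--     return "(" + "|".join(parts) + ")"
-- ===== Notes on version B (the rewrite author's own statement) =====
-- stated objective: simpler
-- what changed: A tokenizes the bracket body with an index-driven while loop into a token list and then expands tokens in a second pass; B is a single recursive pass over the body that emits the expanded alternatives directly, with no intermediate token list.
import Mathlib
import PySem

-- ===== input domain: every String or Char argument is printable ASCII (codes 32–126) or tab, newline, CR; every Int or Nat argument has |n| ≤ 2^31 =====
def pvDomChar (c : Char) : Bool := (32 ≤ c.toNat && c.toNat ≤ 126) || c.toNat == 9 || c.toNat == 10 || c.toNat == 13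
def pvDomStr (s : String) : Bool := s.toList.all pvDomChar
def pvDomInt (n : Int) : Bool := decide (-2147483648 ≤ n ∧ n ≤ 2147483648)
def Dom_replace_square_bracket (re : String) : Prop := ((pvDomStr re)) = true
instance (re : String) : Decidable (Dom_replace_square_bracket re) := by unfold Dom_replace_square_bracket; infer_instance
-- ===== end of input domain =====

-- B replaces A's two passes (index-based tokenizer, then token expansion) by one recursive
-- pass over the bracket body that emits the expanded alternatives directly (objective: simpler).

-- ===== PORT A =====
-- the while loop of A: index-driven scan of to_dispose, appending the tokens to ctn
def pvATokLoop (td : List Char) (l index : Int) (ctn : List (List Char)) : List (List Char) :=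
  if index < l then
    if PySem.List.pyGetD td index ' ' = '\\' ∧ index + 1 < l then
      pvATokLoop td l (index + 2)
        (ctn ++ [[PySem.List.pyGetD td index ' ', PySem.List.pyGetD td (index + 1) ' ']])
    else if index + 2 < l ∧ PySem.List.pyGetD td (index + 1) ' ' = '-' then
      pvATokLoop td l (index + 3)
        (ctn ++ [[PySem.List.pyGetD td index ' ', PySem.List.pyGetD td (index + 1) ' ',
                  PySem.List.pyGetD td (index + 2) ' ']])
    else
      pvATokLoop td l (index + 1) (ctn ++ [[PySem.List.pyGetD td index ' ']])
  else ctn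
termination_by (l - index).toNat
decreasing_by all_goals omega

-- the body of A's second loop for one token: '"-" in item and "\\" not in item' ported as
-- single-character membership (exact for one-character needles); item is always nonempty,
-- so headD/getLastD defaults are never read (Python item[0] / item[-1])
def pvAExpand (item : List Char) : List (List Char) :=
  if item.contains '-' ∧ ¬ item.contains '\\' then
    (PySem.List.pyRange ((item.headD ' ').toNat) (((item.getLastD ' ').toNat) + 1) 1).map
      (fun i => [Char.ofNat i.toNat])
  else [item]

def replace_square_bracket (re : String) : String :=
  let td := (PySem.Str.slice re (some 1) (some (PySem.Str.len re - 1))).toList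
  let ctn := pvATokLoop td (td.length : Int) 0 []
  let chars := ctn.foldl (fun acc item => acc ++ pvAExpand item) []
  String.ofList ('(' :: PySem.Chars.join ['|'] chars ++ [')'])

-- ===== PORT B =====
-- Source B's while loop: one pass over the body, emitting expanded parts directly
def pvBLoop (body : List Char) (l i : Int) (parts : List (List Char)) : List (List Char) :=
  if i < l then
    if PySem.List.pyGetD body i ' ' = '\\' ∧ i + 1 < l then
      pvBLoop body l (i + 2)
        (parts ++ [[PySem.List.pyGetD body i ' ', PySem.List.pyGetD body (i + 1) ' ']])
    else if i + 2 < l ∧ PySem.List.pyGetD body (i + 1) ' ' = '-' then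
      if PySem.List.pyGetD body (i + 2) ' ' = '\\' then
        pvBLoop body l (i + 3)
          (parts ++ [[PySem.List.pyGetD body i ' ', PySem.List.pyGetD body (i + 1) ' ',
                      PySem.List.pyGetD body (i + 2) ' ']])
      else
        pvBLoop body l (i + 3)
          (parts ++ (PySem.List.pyRange ((PySem.List.pyGetD body i ' ').toNat)
              (((PySem.List.pyGetD body (i + 2) ' ').toNat) + 1) 1).map
            (fun k => [Char.ofNat k.toNat]))
    else pvBLoop body l (i + 1) (parts ++ [[PySem.List.pyGetD body i ' ']])
  else parts
termination_by (l - i).toNat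
decreasing_by all_goals omega

def replace_square_bracket_alt (re : String) : String :=
  let body := (PySem.Str.slice re (some 1) (some (PySem.Str.len re - 1))).toList
  String.ofList ('(' ::
    PySem.Chars.join ['|'] (pvBLoop body (body.length : Int) 0 []) ++ [')'])

-- ===== PRECONDITION & SPEC =====
def Spec_replace_square_bracket (re : String) (out : String) : Prop := out = replace_square_bracket_alt re
instance (re : String) (out : String) : Decidable (Spec_replace_square_bracket re out) := by unfold Spec_replace_square_bracket; infer_instance

-- ===== CLAIM (what is proved, stated in full; the proofs are below) =====
def Claim_equal_replace_square_bracket : Prop := ∀ (re : String), Dom_replace_square_bracket re → Spec_replace_square_bracket re (replace_square_bracket re)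

-- ===== LEMMAS AND PROOFS =====

-- proof-side structural tokenizer: what A's while loop produces from the unscanned suffix
def pvTok (s : List Char) : List (List Char) :=
  match s with
  | [] => []
  | c :: rest =>
    if c = '\\' ∧ 2 ≤ rest.length + 1 then
      ['\\', rest.headD ' '] :: pvTok rest.tail
    else if 3 ≤ rest.length + 1 ∧ rest.headD ' ' = '-' then
      [c, '-', rest.getD 1 ' '] :: pvTok (rest.drop 2)
    else [c] :: pvTok rest
termination_by s.length
decreasing_by all_goals simp [List.length_tail] <;> omega

-- proof-side structural one-pass emitter: what B's while loop produces from the unscanned suffix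
def pvEmit (s : List Char) : List (List Char) :=
  match s with
  | [] => []
  | c :: rest =>
    if c = '\\' ∧ 2 ≤ rest.length + 1 then
      [c, rest.headD ' '] :: pvEmit rest.tail
    else if 3 ≤ rest.length + 1 ∧ rest.headD ' ' = '-' then
      if rest.getD 1 ' ' = '\\' then
        [c, '-', '\\'] :: pvEmit (rest.drop 2)
      else
        (PySem.List.pyRange (c.toNat) (((rest.getD 1 ' ').toNat) + 1) 1).map
          (fun i => [Char.ofNat i.toNat]) ++ pvEmit (rest.drop 2)
    else [c] :: pvEmit rest
termination_by s.length
decreasing_by all_goals simp [List.length_tail] <;> omega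

lemma pvGetD_append (pre suf : List Char) (k : Nat) (d : Char) :
    PySem.List.pyGetD (pre ++ suf) ((pre.length : Int) + (k : Int)) d = suf.getD k d := by
  have h1 : ((pre.length : Int) + (k : Int)) = ((pre.length + k : Nat) : Int) := by push_cast; ring
  rw [h1, PySem.List.pyGetD_natCast]
  simp [List.getD, List.getElem?_append_right (Nat.le_add_right _ _)]

lemma pvATokLoop_eq_tok : ∀ n (suf pre : List Char) (ctn : List (List Char)), suf.length ≤ n →
    pvATokLoop (pre ++ suf) ((pre ++ suf).length : Int) (pre.length : Int) ctn
      = ctn ++ pvTok suf := by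
  intro n
  induction n with
  | zero =>
    intro suf pre ctn h
    have hs : suf = [] := List.eq_nil_of_length_eq_zero (Nat.le_zero.mp h)
    subst hs
    rw [pvATokLoop, pvTok]
    simp
  | succ n ih =>
    intro suf pre ctn h
    match suf with
    | [] => rw [pvATokLoop, pvTok]; simp
    | c :: rest =>
      have hlen : ((pre ++ c :: rest).length : Int)
          = (pre.length : Int) + (rest.length : Int) + 1 := by
        simp [List.length_append]; push_cast; ring
      have h0 : rest.getD 0 ' ' = rest.headD ' ' := by cases rest <;> simp
      have hget0 : PySem.List.pyGetD (pre ++ c :: rest) (pre.length : Int) ' ' = c := by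
        simpa using pvGetD_append pre (c :: rest) 0 ' '
      have hget1 : PySem.List.pyGetD (pre ++ c :: rest) ((pre.length : Int) + 1) ' '
          = rest.headD ' ' := by
        rw [← h0]; simpa using pvGetD_append pre (c :: rest) 1 ' '
      have hget2 : PySem.List.pyGetD (pre ++ c :: rest) ((pre.length : Int) + 2) ' '
          = rest.getD 1 ' ' := by
        simpa using pvGetD_append pre (c :: rest) 2 ' '
      rw [pvATokLoop, pvTok]
      rw [if_pos (show (pre.length : Int) < ((pre ++ c :: rest).length : Int) by
        rw [hlen]; omega)]
      rw [hget0, hget1, hget2]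
      by_cases hc : c = '\\' ∧ 2 ≤ rest.length + 1
      · -- escape branch
        obtain ⟨hc1, hc2⟩ := hc
        match rest, h, hc2 with
        | d :: rest2, h, _ =>
          rw [if_pos ⟨hc1, show (pre.length : Int) + 1 < _ by
              rw [hlen]; simp only [List.length_cons]; push_cast; omega⟩]
          rw [if_pos ⟨hc1, by simp only [List.length_cons]; omega⟩]
          have hsplit : pre ++ c :: d :: rest2 = (pre ++ [c, d]) ++ rest2 := by simp
          have hidx : (pre.length : Int) + 2 = (((pre ++ [c, d]).length : Nat) : Int) := by
            simp <;> omega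
          rw [hsplit, hidx, ih rest2 (pre ++ [c, d]) _ (by
            simp only [List.length_cons] at h; omega)]
          subst hc1; simp
      · have hA1 : ¬ (PySem.List.pyGetD (pre ++ c :: rest) (pre.length : Int) ' ' = '\\'
            ∧ (pre.length : Int) + 1 < ((pre ++ c :: rest).length : Int)) := by
          rw [hget0]
          intro hh
          refine hc ⟨hh.1, ?_⟩
          have := hh.2
          rw [hlen] at this; omega
        rw [hget0] at hA1
        rw [if_neg hA1, if_neg hc]
        by_cases hr : 3 ≤ rest.length + 1 ∧ rest.headD ' ' = '-'
        · -- range branch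
          obtain ⟨hr1, hr2⟩ := hr
          match rest, h, hr1, hr2 with
          | c2 :: d :: rest3, h, _, hr2 =>
            simp only [List.headD_cons] at hr2
            rw [if_pos ⟨show (pre.length : Int) + 2 < _ by
                rw [hlen]; simp only [List.length_cons]; push_cast; omega,
              by simpa using hr2⟩]
            rw [if_pos ⟨by simp only [List.length_cons]; omega, by simpa using hr2⟩]
            have hsplit : pre ++ c :: c2 :: d :: rest3 = (pre ++ [c, c2, d]) ++ rest3 := by simp
            have hidx : (pre.length : Int) + 3 = (((pre ++ [c, c2, d]).length : Nat) : Int) := by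
              simp <;> omega
            rw [hsplit, hidx, ih rest3 (pre ++ [c, c2, d]) _ (by
              simp only [List.length_cons] at h; omega)]
            subst hr2; simp
        · -- single-char branch
          have hA2 : ¬ ((pre.length : Int) + 2 < ((pre ++ c :: rest).length : Int)
              ∧ rest.headD ' ' = '-') := by
            intro hh
            refine hr ⟨?_, hh.2⟩
            have := hh.1
            rw [hlen] at this; omega
          rw [if_neg hA2, if_neg hr]
          have hsplit : pre ++ c :: rest = (pre ++ [c]) ++ rest := by simp
          have hidx : (pre.length : Int) + 1 = (((pre ++ [c]).length : Nat) : Int) := by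
            simp <;> omega
          rw [hsplit, hidx, ih rest (pre ++ [c]) _ (by
            simp only [List.length_cons] at h; omega)]
          simp

lemma pvBLoop_eq_emit : ∀ n (suf pre : List Char) (parts : List (List Char)), suf.length ≤ n →
    pvBLoop (pre ++ suf) ((pre ++ suf).length : Int) (pre.length : Int) parts
      = parts ++ pvEmit suf := by
  intro n
  induction n with
  | zero =>
    intro suf pre parts h
    have hs : suf = [] := List.eq_nil_of_length_eq_zero (Nat.le_zero.mp h)
    subst hs
    rw [pvBLoop, pvEmit]
    simp
  | succ n ih =>
    intro suf pre parts h
    match suf with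
    | [] => rw [pvBLoop, pvEmit]; simp
    | c :: rest =>
      have hlen : ((pre ++ c :: rest).length : Int)
          = (pre.length : Int) + (rest.length : Int) + 1 := by
        simp [List.length_append]; push_cast; ring
      have h0 : rest.getD 0 ' ' = rest.headD ' ' := by cases rest <;> simp
      have hget0 : PySem.List.pyGetD (pre ++ c :: rest) (pre.length : Int) ' ' = c := by
        simpa using pvGetD_append pre (c :: rest) 0 ' '
      have hget1 : PySem.List.pyGetD (pre ++ c :: rest) ((pre.length : Int) + 1) ' '
          = rest.headD ' ' := by
        rw [← h0]; simpa using pvGetD_append pre (c :: rest) 1 ' '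
      have hget2 : PySem.List.pyGetD (pre ++ c :: rest) ((pre.length : Int) + 2) ' '
          = rest.getD 1 ' ' := by
        simpa using pvGetD_append pre (c :: rest) 2 ' '
      rw [pvBLoop, pvEmit]
      rw [if_pos (show (pre.length : Int) < ((pre ++ c :: rest).length : Int) by
        rw [hlen]; omega)]
      rw [hget0, hget1, hget2]
      by_cases hc : c = '\\' ∧ 2 ≤ rest.length + 1
      · -- escape branch
        obtain ⟨hc1, hc2⟩ := hc
        match rest, h, hc2 with
        | d :: rest2, h, _ =>
          rw [if_pos ⟨hc1, show (pre.length : Int) + 1 < _ by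
              rw [hlen]; simp only [List.length_cons]; push_cast; omega⟩]
          rw [if_pos ⟨hc1, by simp only [List.length_cons]; omega⟩]
          have hsplit : pre ++ c :: d :: rest2 = (pre ++ [c, d]) ++ rest2 := by simp
          have hidx : (pre.length : Int) + 2 = (((pre ++ [c, d]).length : Nat) : Int) := by
            simp <;> omega
          rw [hsplit, hidx, ih rest2 (pre ++ [c, d]) _ (by
            simp only [List.length_cons] at h; omega)]
          simp
      · have hA1 : ¬ (c = '\\' ∧ (pre.length : Int) + 1 < ((pre ++ c :: rest).length : Int)) := by
          intro hh
          refine hc ⟨hh.1, ?_⟩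
          have := hh.2
          rw [hlen] at this; omega
        rw [if_neg hA1, if_neg hc]
        by_cases hr : 3 ≤ rest.length + 1 ∧ rest.headD ' ' = '-'
        · -- range branch
          obtain ⟨hr1, hr2⟩ := hr
          match rest, h, hr1, hr2 with
          | c2 :: d :: rest3, h, _, hr2 =>
            simp only [List.headD_cons] at hr2
            rw [if_pos ⟨show (pre.length : Int) + 2 < _ by
                rw [hlen]; simp only [List.length_cons]; push_cast; omega,
              by simpa using hr2⟩]
            have hsplit : pre ++ c :: c2 :: d :: rest3 = (pre ++ [c, c2, d]) ++ rest3 := by simp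
            have hidx : (pre.length : Int) + 3 = (((pre ++ [c, c2, d]).length : Nat) : Int) := by
              simp <;> omega
            have hlen3 : rest3.length ≤ n := by simp only [List.length_cons] at h; omega
            by_cases hd : (c2 :: d :: rest3).getD 1 ' ' = '\\'
            · rw [if_pos hd]
              rw [if_pos ⟨by simp only [List.length_cons]; omega, by simpa using hr2⟩]
              rw [if_pos (by simpa using hd)]
              rw [hsplit, hidx, ih rest3 (pre ++ [c, c2, d]) _ hlen3]
              simp only [List.getD_cons_succ, List.getD_cons_zero] at hd
              subst hr2; subst hd; simp
            · rw [if_neg hd]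
              rw [if_pos ⟨by simp only [List.length_cons]; omega, by simpa using hr2⟩]
              rw [if_neg (by simpa using hd)]
              rw [hsplit, hidx, ih rest3 (pre ++ [c, c2, d]) _ hlen3]
              subst hr2; simp
        · -- single-char branch
          have hA2 : ¬ ((pre.length : Int) + 2 < ((pre ++ c :: rest).length : Int)
              ∧ rest.headD ' ' = '-') := by
            intro hh
            refine hr ⟨?_, hh.2⟩
            have := hh.1
            rw [hlen] at this; omega
          rw [if_neg hA2, if_neg hr]
          have hsplit : pre ++ c :: rest = (pre ++ [c]) ++ rest := by simp
          have hidx : (pre.length : Int) + 1 = (((pre ++ [c]).length : Nat) : Int) := by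
            simp <;> omega
          rw [hsplit, hidx, ih rest (pre ++ [c]) _ (by
            simp only [List.length_cons] at h; omega)]
          simp

lemma pvExpand_fuse : ∀ n (s : List Char) (acc : List (List Char)), s.length ≤ n →
    (pvTok s).foldl (fun acc item => acc ++ pvAExpand item) acc = acc ++ pvEmit s := by
  intro n
  induction n with
  | zero =>
    intro s acc h
    have hs : s = [] := List.eq_nil_of_length_eq_zero (Nat.le_zero.mp h)
    subst hs; rw [pvTok, pvEmit]; simp
  | succ n ih =>
    intro s acc h
    match s with
    | [] => rw [pvTok, pvEmit]; simp
    | c :: rest =>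
      rw [pvTok, pvEmit]
      by_cases hc : c = '\\' ∧ 2 ≤ rest.length + 1
      · rw [if_pos hc, if_pos hc, List.foldl_cons,
          ih rest.tail _ (by simp [List.length_tail] at h ⊢; omega)]
        have : pvAExpand ['\\', rest.headD ' '] = [['\\', rest.headD ' ']] := by
          rw [pvAExpand, if_neg (by simp)]
        rw [this]
        obtain ⟨hc1, _⟩ := hc
        subst hc1; simp
      · rw [if_neg hc, if_neg hc]
        by_cases hr : 3 ≤ rest.length + 1 ∧ rest.headD ' ' = '-'
        · have hcne : c ≠ '\\' := by
            intro hcc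
            exact hc ⟨hcc, by omega⟩
          rw [if_pos hr, if_pos hr, List.foldl_cons,
            ih (rest.drop 2) _ (by simp at h ⊢; omega)]
          by_cases hd : rest.getD 1 ' ' = '\\'
          · rw [if_pos hd, hd]
            have : pvAExpand [c, '-', '\\'] = [[c, '-', '\\']] := by
              rw [pvAExpand, if_neg (by simp)]
            rw [this]; simp
          · rw [if_neg hd]
            have : pvAExpand [c, '-', rest.getD 1 ' ']
                = (PySem.List.pyRange (c.toNat) (((rest.getD 1 ' ').toNat) + 1) 1).map
                    (fun i => [Char.ofNat i.toNat]) := by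
              rw [pvAExpand, if_pos (by
                simp only [List.getD] at hd
                simp
                exact ⟨fun hh => hcne hh.symm, fun hh => hd hh.symm⟩)]
              simp
            rw [this]; simp
        · rw [if_neg hr, if_neg hr, List.foldl_cons,
            ih rest _ (by simpa using Nat.le_of_succ_le_succ h)]
          by_cases hcd : c = '-'
          · have : pvAExpand [c] = [[c]] := by
              subst hcd; rw [pvAExpand, if_pos (by simp)]
              decide
            rw [this]; simp
          · by_cases hcb : c = '\\'
            · have : pvAExpand [c] = [[c]] := by
                subst hcb; rw [pvAExpand, if_neg (by simp)]
              rw [this]; simp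
            · have : pvAExpand [c] = [[c]] := by
                rw [pvAExpand, if_neg (by
                simp
                exact fun hh => absurd hh.symm hcd)]
              rw [this]; simp

-- ===== VERDICT (by name: the statement is the Claim_ definition above) =====
theorem replace_square_bracket_spec : Claim_equal_replace_square_bracket := by
  intro re _
  show _ = _
  unfold replace_square_bracket replace_square_bracket_alt
  dsimp only
  generalize (PySem.Str.slice re (some 1) (some (PySem.Str.len re - 1))).toList = td
  have h1 : pvATokLoop td (td.length : Int) 0 [] = pvTok td := by
    simpa using pvATokLoop_eq_tok td.length td [] [] le_rfl
  have h2 : pvBLoop td (td.length : Int) 0 [] = pvEmit td := by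
    simpa using pvBLoop_eq_emit td.length td [] [] le_rfl
  rw [h1, h2, pvExpand_fuse td.length td [] le_rfl]
  simp
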